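-- pv_equiv track=rewrite | github.com/BenWibking/cloudy-grid-enhanced | scripts/convert_cooling_grid_to_hdf5.py | get_grid_indices
-- ===== SOURCE A (Python) =====
-- from typing import Iterable, List, Sequence, Tuple
--
-- def get_grid_indices(dims: List[int], index: int) -> List[int]:
--     """Return the multidimensional indices corresponding to a flat index."""
--     if not dims:
--         return []
--     indices: List[int] = []
--     for dim in reversed(dims):
--         indices.append(index % dim)
--         index //= dim
--     return list(reversed(indices))
-- ===== SOURCE B (Python) =====
-- def get_grid_indices(dims, index):
--     """Return the multidimensional indices corresponding to a flat index."""
--     def go(lo, hi, q):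
--         # indices for dims[lo:hi] plus the remaining quotient, dividing right to left
--         if hi - lo == 0:
--             return [], q
--         if hi - lo == 1:
--             q2, r = divmod(q, dims[lo])
--             return [r], q2
--         mid = (lo + hi) // 2
--         right, q = go(mid, hi, q)
--         left, q = go(lo, mid, q)
--         return left + right, q
--     return go(0, len(dims), index)[0]
-- ===== Notes on version B (the rewrite author's own statement) =====
-- stated objective: alternative
-- what changed: B replaces A's reversed scan with append, running index mutation and final reverse by a divide-and-conquer recursion on half-intervals that threads the quotient from the right half into the left half and assembles the answer by concatenation (no loop, no accumulator, no reversal).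
import Mathlib
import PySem

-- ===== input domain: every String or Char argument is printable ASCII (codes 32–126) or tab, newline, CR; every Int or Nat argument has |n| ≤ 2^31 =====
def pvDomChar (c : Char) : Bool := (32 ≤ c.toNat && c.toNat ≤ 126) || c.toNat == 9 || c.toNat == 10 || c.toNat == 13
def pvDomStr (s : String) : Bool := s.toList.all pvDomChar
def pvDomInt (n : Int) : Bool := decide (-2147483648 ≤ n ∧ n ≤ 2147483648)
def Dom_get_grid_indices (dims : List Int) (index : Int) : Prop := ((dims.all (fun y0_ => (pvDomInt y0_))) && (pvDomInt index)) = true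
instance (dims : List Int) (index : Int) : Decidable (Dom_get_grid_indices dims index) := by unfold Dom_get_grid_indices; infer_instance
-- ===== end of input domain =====

-- B: divide-and-conquer on half-intervals threading the quotient right-to-left,
-- assembling the answer by concatenation — different decomposition (no scan, no append-and-reverse), same values.

-- ===== PORT A =====
-- literal port of A: loop over reversed(dims), appending index % dim and flooring index, then reverse.
def get_grid_indices (dims : List Int) (index : Int) : List Int :=
  if dims = [] then []
  else
    (dims.reverse.foldl
      (fun (st : List Int × Int) dim =>
        (st.1 ++ [PySem.Int.mod st.2 dim], PySem.Int.floordiv st.2 dim))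
      (([] : List Int), index)).1.reverse

-- ===== PORT B =====
-- literal port of Source B's inner go(lo, hi, q): indices for dims[lo:hi] plus the remaining
-- quotient; the right half is processed first, its quotient fed to the left half.
-- lo, hi are the nonnegative Python ints 0 ≤ lo ≤ hi ≤ len(dims), kept as Nat; dims[lo]
-- (in range on every call made) is pyGetD.
def pvGo (dims : List Int) (lo hi : Nat) (q : Int) : List Int × Int :=
  if hi - lo = 0 then ([], q)
  else if hi - lo = 1 then
    let d := PySem.List.pyGetD dims (lo : Int) 0
    ([PySem.Int.mod q d], PySem.Int.floordiv q d)
  else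
    let mid := (lo + hi) / 2
    let r := pvGo dims mid hi q
    let l := pvGo dims lo mid r.2
    (l.1 ++ r.1, l.2)
termination_by hi - lo
decreasing_by all_goals omega

def get_grid_indices_alt (dims : List Int) (index : Int) : List Int :=
  (pvGo dims 0 dims.length index).1

-- ===== PRECONDITION & SPEC =====
-- A raises ZeroDivisionError iff some dim is 0 (every dim is divided by); B raises there too.
def Pre_get_grid_indices (dims : List Int) (index : Int) : Prop := (0 : Int) ∉ dims
instance (dims : List Int) (index : Int) : Decidable (Pre_get_grid_indices dims index) := by unfold Pre_get_grid_indices; infer_instance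
def pvWitness_get_grid_indices : List Int × Int := ([2, 3], 5)
def Spec_get_grid_indices (dims : List Int) (index : Int) (out : List Int) : Prop := out = get_grid_indices_alt dims index
instance (dims : List Int) (index : Int) (out : List Int) : Decidable (Spec_get_grid_indices dims index out) := by unfold Spec_get_grid_indices; infer_instance

-- ===== CLAIM (what is proved, stated in full; the proofs are below) =====
def Claim_equal_get_grid_indices : Prop := ∀ (dims : List Int) (index : Int), Dom_get_grid_indices dims index → Pre_get_grid_indices dims index → Spec_get_grid_indices dims index (get_grid_indices dims index)

-- ===== LEMMAS AND PROOFS =====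

-- the common mathematical skeleton: structural recursion on REVERSED dims,
-- returning (the multidimensional indices, the final quotient)
def pvRecR : List Int → Int → List Int × Int
  | [], q => ([], q)
  | d :: rest, q =>
    let p := pvRecR rest (PySem.Int.floordiv q d)
    (p.1 ++ [PySem.Int.mod q d], p.2)

-- A's fold: the accumulated list is a pure prefix, the running index is independent of it
theorem pv_fold_acc (l : List Int) (a : List Int) (i : Int) :
    l.foldl (fun (st : List Int × Int) dim =>
        (st.1 ++ [PySem.Int.mod st.2 dim], PySem.Int.floordiv st.2 dim)) (a, i)
    = (a ++ (l.foldl (fun (st : List Int × Int) dim =>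
        (st.1 ++ [PySem.Int.mod st.2 dim], PySem.Int.floordiv st.2 dim)) ([], i)).1,
       (l.foldl (fun (st : List Int × Int) dim =>
        (st.1 ++ [PySem.Int.mod st.2 dim], PySem.Int.floordiv st.2 dim)) ([], i)).2) := by
  induction l generalizing a i with
  | nil => simp
  | cons d l ih =>
    simp only [List.foldl_cons]
    rw [ih, ih ([] ++ [PySem.Int.mod i d])]
    simp

-- A's fold over a (reversed) list computes pvRecR of that list, with the indices reversed
theorem pv_fold_eq_recR (l : List Int) (i : Int) :
    l.foldl (fun (st : List Int × Int) dim =>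
        (st.1 ++ [PySem.Int.mod st.2 dim], PySem.Int.floordiv st.2 dim)) ([], i)
    = ((pvRecR l i).1.reverse, (pvRecR l i).2) := by
  induction l generalizing i with
  | nil => simp [pvRecR]
  | cons d l ih =>
    simp only [List.foldl_cons, List.nil_append]
    rw [pv_fold_acc, ih]
    simp [pvRecR]

theorem pv_A_eq_recR (dims : List Int) (index : Int) :
    get_grid_indices dims index = (pvRecR dims.reverse index).1 := by
  unfold get_grid_indices
  by_cases h : dims = []
  · subst h; simp [pvRecR]
  · simp only [h, if_false]
    rw [pv_fold_eq_recR]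
    simp

-- pvRecR is compositional: the first block's quotient feeds the second block,
-- the second block's indices land on the left
theorem pv_recR_append (u v : List Int) (q : Int) :
    pvRecR (u ++ v) q
    = ((pvRecR v (pvRecR u q).2).1 ++ (pvRecR u q).1, (pvRecR v (pvRecR u q).2).2) := by
  induction u generalizing q with
  | nil => simp [pvRecR]
  | cons d u ih =>
    simp only [List.cons_append, pvRecR]
    rw [ih]
    simp

-- pvGo on an in-range interval computes pvRecR of the reversed segment dims[lo:hi]
theorem pv_go_eq_recR (dims : List Int) (n : Nat) :
    ∀ lo hi : Nat, hi - lo = n → lo ≤ hi → hi ≤ dims.length → ∀ q : Int,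
      pvGo dims lo hi q = pvRecR ((dims.drop lo).take (hi - lo)).reverse q := by
  induction n using Nat.strong_induction_on with
  | _ n ih =>
    intro lo hi hn hlh hlen q
    rw [pvGo]
    by_cases h0 : hi - lo = 0
    · simp [h0, pvRecR]
    · by_cases h1 : hi - lo = 1
      · have hlt : lo < dims.length := by omega
        have hseg : (dims.drop lo).take (hi - lo) = [dims[lo]] := by
          rw [h1]
          rw [List.take_one]
          simp [List.head?_drop, List.getElem?_eq_getElem hlt]
        rw [h1] at hseg
        simp only [h1]
        rw [hseg]
        have : PySem.List.pyGetD dims (lo : Int) 0 = dims[lo] := by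
          rw [PySem.List.pyGetD_natCast]
          simp [List.getD, List.getElem?_eq_getElem hlt]
        simp [pvRecR, this]
      · simp only [h0, if_false, h1, if_false]
        have hmid1 : lo ≤ (lo + hi) / 2 := by omega
        have hmid2 : (lo + hi) / 2 ≤ hi := by omega
        have hlt1 : hi - (lo + hi) / 2 < n := by omega
        have hlt2 : (lo + hi) / 2 - lo < n := by omega
        rw [ih _ hlt1 ((lo + hi) / 2) hi rfl hmid2 hlen,
            ih _ hlt2 lo ((lo + hi) / 2) rfl hmid1 (by omega)]
        have hsplit : (dims.drop lo).take (hi - lo)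
            = (dims.drop lo).take ((lo + hi) / 2 - lo)
              ++ (dims.drop ((lo + hi) / 2)).take (hi - (lo + hi) / 2) := by
          rw [show hi - lo = ((lo + hi) / 2 - lo) + (hi - (lo + hi) / 2) by omega,
              List.take_add, List.drop_drop,
              show lo + ((lo + hi) / 2 - lo) = (lo + hi) / 2 by omega]
        rw [hsplit, List.reverse_append, pv_recR_append]

theorem pv_B_eq_recR (dims : List Int) (index : Int) :
    get_grid_indices_alt dims index = (pvRecR dims.reverse index).1 := by
  unfold get_grid_indices_alt
  rw [pv_go_eq_recR dims (dims.length - 0) 0 dims.length rfl (by omega) le_rfl index]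
  simp

theorem pv_main (dims : List Int) (index : Int) :
    get_grid_indices dims index = get_grid_indices_alt dims index := by
  rw [pv_A_eq_recR, pv_B_eq_recR]

-- ===== VERDICT (by name: the statement is the Claim_ definition above) =====
theorem get_grid_indices_spec : Claim_equal_get_grid_indices := by
  intro dims index _ _
  unfold Spec_get_grid_indices
  exact pv_main dims index
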